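-- pv_equiv track=rewrite | github.com/mayankmtg/AS_Inference_Algorithm | populate.py | pathCleaning
-- ===== SOURCE A (Python) =====
-- def pathCleaning(path_array):
-- 	cleaned_array=[]
-- 	top=-1
-- 	n=len(path_array)
-- 	for i in range(n-1,0,-1):
-- 		if(top==-1):
-- 			cleaned_array.append(path_array[i])
-- 			top+=1
--
-- 		elif(cleaned_array[top]!=path_array[i]):
-- 			cleaned_array.append(path_array[i])
-- 			top+=1
--
-- 	return cleaned_array
-- ===== SOURCE B (Python) =====
-- def pathCleaning(path_array):
--     tail = path_array[1:]
--     kept = [x for x, nxt in zip(tail, tail[1:]) if x != nxt]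
--     kept.extend(tail[-1:])
--     return kept[::-1]
-- ===== Notes on version B (the rewrite author's own statement) =====
-- stated objective: alternative
-- what changed: B is stateless: it zips the tail of the list with its own shift, filters the pairs whose two components differ (selecting one representative per run of equal elements, no accumulator or top pointer), appends the tail's last element and reverses, instead of A's backward stateful loop that compares each element with the last element appended to the output.
import Mathlib
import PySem

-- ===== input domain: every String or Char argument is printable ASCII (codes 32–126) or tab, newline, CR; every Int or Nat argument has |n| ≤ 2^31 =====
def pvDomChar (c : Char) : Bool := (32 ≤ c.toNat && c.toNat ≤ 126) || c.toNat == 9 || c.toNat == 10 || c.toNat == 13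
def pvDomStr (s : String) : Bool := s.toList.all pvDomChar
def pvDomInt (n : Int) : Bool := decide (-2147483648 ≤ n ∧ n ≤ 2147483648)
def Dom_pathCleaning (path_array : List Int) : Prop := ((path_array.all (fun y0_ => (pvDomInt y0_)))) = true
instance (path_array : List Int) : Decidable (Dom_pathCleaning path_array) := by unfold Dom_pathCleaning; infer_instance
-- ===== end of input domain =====

-- B selects one representative per run of equal elements by zipping the tail with its shift and
-- filtering unequal adjacent pairs (stateless), then appends the last element and reverses,
-- instead of A's backward loop comparing against the last element written to the output.

-- ===== PORT A =====
def pathCleaning (path_array : List Int) : List Int :=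
  let n : Int := path_array.length
  ((PySem.List.pyRange (n - 1) 0 (-1)).foldl
      (fun (st : List Int × Int) i =>
        if st.2 == -1 then
          (st.1 ++ [PySem.List.pyGetD path_array i 0], st.2 + 1)
        else if PySem.List.pyGetD st.1 st.2 0 != PySem.List.pyGetD path_array i 0 then
          (st.1 ++ [PySem.List.pyGetD path_array i 0], st.2 + 1)
        else st)
      ([], -1)).1

-- ===== PORT B =====
def pathCleaning_alt (path_array : List Int) : List Int :=
  let tl := PySem.List.slice path_array (some 1) none
  let kept := ((tl.zip (PySem.List.slice tl (some 1) none)).filter (fun q => q.1 != q.2)).map Prod.fst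
  (kept ++ PySem.List.slice tl (some (-1)) none).reverse

-- ===== PRECONDITION & SPEC =====
def Spec_pathCleaning (path_array : List Int) (out : List Int) : Prop := out = pathCleaning_alt path_array
instance (path_array : List Int) (out : List Int) : Decidable (Spec_pathCleaning path_array out) := by unfold Spec_pathCleaning; infer_instance

-- ===== CLAIM (what is proved, stated in full; the proofs are below) =====
def Claim_equal_pathCleaning : Prop := ∀ (path_array : List Int), Dom_pathCleaning path_array → Spec_pathCleaning path_array (pathCleaning path_array)

-- ===== LEMMAS AND PROOFS =====

/-- Forward consecutive-duplicate collapse relative to the last kept element `a`. -/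
def pvGo (a : Int) : List Int → List Int
  | [] => []
  | y :: ys => if y = a then pvGo a ys else y :: pvGo y ys

/-- Forward consecutive-duplicate collapse of a list. -/
def pvCollapse : List Int → List Int
  | [] => []
  | y :: ys => y :: pvGo y ys

theorem pvGo_append (a x : Int) (ys : List Int) :
    pvGo a (ys ++ [x]) = if x = ys.getLastD a then pvGo a ys else pvGo a ys ++ [x] := by
  induction ys generalizing a with
  | nil => simp [pvGo]
  | cons y ys ih =>
    by_cases hy : y = a
    · subst hy
      simp only [List.cons_append, pvGo, ih, List.getLastD_cons, if_true]
    · simp only [List.cons_append, pvGo, if_neg hy, ih, List.getLastD_cons]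
      split_ifs <;> simp

theorem pvCollapse_append (xs : List Int) (x : Int) :
    pvCollapse (xs ++ [x]) = if some x = xs.getLast? then pvCollapse xs else pvCollapse xs ++ [x] := by
  cases xs with
  | nil => simp [pvCollapse, pvGo]
  | cons y ys =>
    simp only [List.cons_append, pvCollapse, pvGo_append, List.getLast?_cons]
    split_ifs with h1 h2 h2 <;> simp_all

theorem pvCollapse_reverse (l : List Int) :
    pvCollapse l.reverse = (pvCollapse l).reverse := by
  induction l with
  | nil => rfl
  | cons a l ih =>
    rw [List.reverse_cons, pvCollapse_append, List.getLast?_reverse, ih]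
    cases l with
    | nil => simp [pvCollapse, pvGo]
    | cons b l' =>
      by_cases hab : a = b
      · subst hab
        simp [pvCollapse, pvGo]
      · simp [pvCollapse, pvGo, hab, Ne.symm hab]

/-- A's loop body, abstracted over the fetched element value. -/
def pvStepA : List Int × Int → Int → List Int × Int := fun st v =>
  if st.2 == -1 then (st.1 ++ [v], st.2 + 1)
  else if PySem.List.pyGetD st.1 st.2 0 != v then (st.1 ++ [v], st.2 + 1)
  else st

theorem pvMapRange (p : List Int) :
    (PySem.List.pyRange ((p.length : Int) - 1) 0 (-1)).map (fun i => PySem.List.pyGetD p i 0)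
      = p.tail.reverse := by
  rw [PySem.List.pyRange_neg_one, List.map_map]
  apply List.ext_getElem
  · simp only [List.length_map, List.length_range, List.length_reverse, List.length_tail]
    omega
  · intro k h1 h2
    simp only [List.length_map, List.length_range] at h1
    simp only [List.getElem_map, List.getElem_range, Function.comp_apply]
    have hlen : 1 ≤ p.length := by omega
    have hk : k < p.length - 1 := by omega
    simp only [List.length_reverse, List.length_tail] at h2
    rw [PySem.List.pyGetD_eq_getElem p 0 (by omega) (by omega)]
    rw [List.getElem_reverse, List.getElem_tail]
    congr 1
    simp only [List.length_tail]
    omega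

theorem pvAFold (ys : List Int) : ∀ (acc : List Int) (a : Int),
    ys.foldl pvStepA (acc ++ [a], (acc.length : Int))
      = (acc ++ a :: pvGo a ys, (acc.length : Int) + (pvGo a ys).length) := by
  induction ys with
  | nil => intro acc a; simp [pvGo]
  | cons y ys ih =>
    intro acc a
    rw [List.foldl_cons]
    have htop : ((acc.length : Int) == -1) = false := by
      simp only [beq_eq_false_iff_ne, ne_eq]
      omega
    by_cases h : y = a
    · subst h
      have hstep : pvStepA (acc ++ [y], (acc.length : Int)) y = (acc ++ [y], (acc.length : Int)) := by
        simp [pvStepA, htop]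
      rw [hstep, ih]
      simp [pvGo]
    · have hstep : pvStepA (acc ++ [a], (acc.length : Int)) y
          = ((acc ++ [a]) ++ [y], ((acc ++ [a]).length : Int)) := by
        simp [pvStepA, htop, Ne.symm h]
      rw [hstep, ih (acc ++ [a]) y]
      simp [pvGo, h]
      omega

theorem pathCleaning_eq_collapse_rev (p : List Int) :
    pathCleaning p = pvCollapse p.tail.reverse := by
  have key : ∀ (l : List Int) (init : List Int × Int),
      l.foldl (fun (st : List Int × Int) i =>
        if st.2 == -1 then (st.1 ++ [PySem.List.pyGetD p i 0], st.2 + 1)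
        else if PySem.List.pyGetD st.1 st.2 0 != PySem.List.pyGetD p i 0 then
          (st.1 ++ [PySem.List.pyGetD p i 0], st.2 + 1)
        else st) init
      = (l.map (fun i => PySem.List.pyGetD p i 0)).foldl pvStepA init := by
    intro l init
    rw [List.foldl_map]
    rfl
  unfold pathCleaning
  show (List.foldl _ ([], -1) (PySem.List.pyRange ((p.length : Int) - 1) 0 (-1))).1
      = pvCollapse p.tail.reverse
  rw [key, pvMapRange]
  cases ht : p.tail.reverse with
  | nil => rfl
  | cons y ys =>
    rw [List.foldl_cons]
    have hstep : pvStepA ([], -1) y = ([] ++ [y], ((([] : List Int).length : Int))) := by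
      simp [pvStepA]
    rw [hstep, pvAFold]
    simp [pvCollapse]

/-- Dropping all but the last element yields the optional last element as a list. -/
theorem pvDropAllButLast (l : List Int) : l.drop (l.length - 1) = l.getLast?.toList := by
  induction l with
  | nil => rfl
  | cons a t ih =>
    cases t with
    | nil => rfl
    | cons b t' =>
      have : (a :: b :: t').drop ((a :: b :: t').length - 1) = (b :: t').drop ((b :: t').length - 1) := by
        simp
      rw [this, ih]
      simp

/-- The stateless adjacency selection of B equals the stateful collapse. -/
theorem pvCollapse_adj (l : List Int) :
    pvCollapse l = ((l.zip l.tail).filter (fun q => q.1 != q.2)).map Prod.fst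
      ++ l.getLast?.toList := by
  induction l with
  | nil => rfl
  | cons a t ih =>
    cases t with
    | nil => simp [pvCollapse, pvGo]
    | cons b t' =>
      by_cases hab : a = b
      · subst hab
        have hL : pvCollapse (a :: a :: t') = pvCollapse (a :: t') := by
          simp [pvCollapse, pvGo]
        rw [hL, ih]
        simp [List.zip]
      · have hL : pvCollapse (a :: b :: t') = a :: pvCollapse (b :: t') := by
          simp only [pvCollapse, pvGo, if_neg (fun h : b = a => hab h.symm)]
        rw [hL, ih]
        simp [List.zip, hab]

theorem pathCleaning_alt_eq (p : List Int) :
    pathCleaning_alt p = (pvCollapse p.tail).reverse := by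
  simp only [pathCleaning_alt, PySem.List.slice_from_one, PySem.List.slice_from_neg_one]
  rw [pvDropAllButLast, ← pvCollapse_adj]

-- ===== VERDICT (by name: the statement is the Claim_ definition above) =====
theorem pathCleaning_spec : Claim_equal_pathCleaning := by
  intro p _
  show _ = _
  rw [pathCleaning_eq_collapse_rev, pathCleaning_alt_eq, pvCollapse_reverse]
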